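-- pv_equiv track=rewrite | github.com/chanwooleeme/baekjoon | programmers/level1/신규아이디추천.py | solution
-- ===== SOURCE A (Python) =====
-- def solution(new_id):
--     answer = ''
--     #1단계
--     new_id = new_id.lower()
--     #2단계
--     for c in new_id:
--         if c.isalpha() or c.isdigit() or c in ['-', '_', '.']:
--             answer += c
--     #3단계
--     while '..' in answer:
--         answer = answer.replace('..', '.')
--
--     #4단계
--     if answer[0] == '.':
--         if len(answer) > 1:
--             answer = answer[1:]
--         else:
--             answer='.'
--
--     if answer[-1] == '.':
--         answer = answer[:-1]
--
--     #5
--     if answer == '':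
--         answer = 'a'
--
--     #6
--     if len(answer) >= 16:
--         answer = answer[:15]
--         if answer[-1] == '.':
--             answer = answer[:-1]
--
--     while len(answer) < 3:
--         answer += answer[-1]
--
--     return answer
-- ===== SOURCE B (Python) =====
-- def solution(new_id):
--     # one fused pass: keep valid chars, skipping a '.' that would follow a '.'
--     out = []
--     for c in new_id.lower():
--         if (c.isalnum() or c in "-_.") and not (c == '.' and out and out[-1] == '.'):
--             out.append(c)
--     s = ''.join(out).strip('.')
--     if not s:
--         s = 'a'
--     if len(s) >= 16:
--         s = s[:15].rstrip('.')
--     return s if len(s) >= 3 else s + s[-1] * (3 - len(s))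
-- ===== Notes on version B (the rewrite author's own statement) =====
-- stated objective: simpler
-- what changed: B replaces A's separate filter pass plus repeated `while '..' in answer: answer = answer.replace('..','.')` loop with a single scan that keeps valid characters while skipping a '.' that would follow a '.', and replaces A's index-based one-dot trims with strip('.')/rstrip('.'); A's IndexError on inputs with no valid character is excluded by Pre_ (B returns 'aaa' there, see raises).
-- outside the precondition, e.g. on solution('=]!'): A raises IndexError, B returns 'aaa'
-- crash fix: On inputs where no character survives the filter (no letter, digit, '-', '_' or '.'), A raises IndexError at answer[0]; B returns 'aaa'. — e.g. on solution("=]!"): A raises IndexError, B returns "aaa"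
import Mathlib
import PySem

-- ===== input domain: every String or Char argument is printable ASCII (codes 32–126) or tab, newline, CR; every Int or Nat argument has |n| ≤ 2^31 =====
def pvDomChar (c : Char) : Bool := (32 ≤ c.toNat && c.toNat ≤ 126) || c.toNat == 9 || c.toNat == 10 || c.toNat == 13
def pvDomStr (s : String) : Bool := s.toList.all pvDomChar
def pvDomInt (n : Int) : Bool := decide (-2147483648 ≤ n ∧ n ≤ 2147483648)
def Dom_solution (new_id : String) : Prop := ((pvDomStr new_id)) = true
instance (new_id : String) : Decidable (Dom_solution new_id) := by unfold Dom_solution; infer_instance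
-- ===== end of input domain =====

-- B fuses A's filter pass and its repeated `'..' -> '.'` replace loop into one scan (objective: simpler); A raises IndexError when no character survives the filter — those inputs are outside Pre_ (see Raises_ block).

-- ===== PORT A =====
-- structural form of one Python `answer.replace('..', '.')` pass; pvReplace_dd_eq and
-- pvRep_length_lt are cited by the port's `decreasing_by`, so they live up here
def pvRep : List Char → List Char
  | [] => []
  | c :: t =>
    if c = '.' ∧ t.head? = some '.' then '.' :: pvRep t.tail
    else c :: pvRep t
termination_by l => l.length
decreasing_by all_goals (simp_all [List.length_tail]; try omega)


lemma pvRep_go_eq (fuel : Nat) : ∀ (l acc : List Char), l.length ≤ fuel →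
    PySem.Chars.replace.go ['.', '.'] ['.'] fuel l acc = acc.reverse ++ pvRep l := by
  induction fuel with
  | zero =>
    intro l acc h
    have hl : l = [] := List.eq_nil_of_length_eq_zero (by omega)
    subst hl
    rw [PySem.Chars.replace.go]
    simp [pvRep]
  | succ f ih =>
    intro l acc h
    match l with
    | [] => rw [PySem.Chars.replace.go]; simp [pvRep]; omega
    | c :: t =>
      rw [PySem.Chars.replace.go]
      by_cases hp : (['.', '.'] : List Char).isPrefixOf (c :: t) = true
      · cases t with
        | nil => simp [List.isPrefixOf] at hp
        | cons d t' =>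
          have hcd : '.' = c ∧ '.' = d := by
            simpa [List.isPrefixOf] using hp
          obtain ⟨hc, hd⟩ := hcd
          subst hc; subst hd
          simp only [hp, if_pos]
          rw [show List.drop (['.', '.'] : List Char).length ('.' :: '.' :: t') = t' from rfl]
          rw [ih t' _ (by simp at h ⊢; omega)]
          rw [pvRep]
          simp
      · rw [if_neg hp]
        rw [ih t _ (by simp at h ⊢; omega)]
        rw [pvRep]
        have hcond : ¬ (c = '.' ∧ t.head? = some '.') := by
          intro ⟨h1, h2⟩
          cases t with
          | nil => simp at h2
          | cons d t' =>
            simp at h2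
            subst h1; subst h2
            simp [List.isPrefixOf] at hp
        simp [hcond]


lemma pvReplace_dd_eq (ans : List Char) :
    PySem.Chars.replace ans ['.', '.'] ['.'] = pvRep ans := by
  simpa [PySem.Chars.replace] using pvRep_go_eq ans.length ans [] le_rfl

lemma pvRep_length_le (l : List Char) : (pvRep l).length ≤ l.length := by
  induction l using pvRep.induct with
  | case1 => simp [pvRep]
  | case2 c t hc ih =>
    rw [pvRep]; simp only [if_pos hc]
    cases t with
    | nil => simp at hc
    | cons d t' => simp at ih ⊢; omega
  | case3 c t hc ih => rw [pvRep]; simp [if_neg hc]; omega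


lemma pvRep_length_lt (l : List Char) (h : (['.', '.'] : List Char) <:+: l) :
    (pvRep l).length < l.length := by
  induction l using pvRep.induct with
  | case1 => simp at h
  | case2 c t hc ih =>
    rw [pvRep]; simp only [if_pos hc]
    cases t with
    | nil => simp at hc
    | cons d t' =>
      have := pvRep_length_le t'
      simp; omega
  | case3 c t hc ih =>
    rw [pvRep]; simp only [if_neg hc]
    rcases List.infix_cons_iff.mp h with hpre | hinf
    · exfalso
      apply hc
      rcases hpre with ⟨r, hr⟩
      cases t with
      | nil => simp at hr
      | cons d t' =>
        injection hr with h1 h2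
        injection h2 with h3 h4
        exact ⟨h1.symm, by simp [h3.symm]⟩
    · have := ih hinf
      simp; omega

-- `while '..' in answer: answer = answer.replace('..', '.')`
def pvCollapseA (ans : List Char) : List Char :=
  if PySem.Chars.isIn ['.', '.'] ans then
    pvCollapseA (PySem.Chars.replace ans ['.', '.'] ['.'])
  else ans
termination_by ans.length
decreasing_by
  rw [pvReplace_dd_eq]
  exact pvRep_length_lt _ ((PySem.Chars.isIn_iff_infix _ _).mp ‹_›)

-- `while len(answer) < 3: answer += answer[-1]`
def pvPadA (ans : List Char) : List Char :=
  if ans.length < 3 then pvPadA (ans ++ [PySem.List.pyGetD ans (-1) ' ']) else ans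
termination_by 3 - ans.length
decreasing_by simp; omega

def solution (new_id : String) : String :=
  let nid := PySem.Chars.lower new_id.toList
  -- step 2
  let answer : List Char :=
    nid.foldl (fun acc c =>
      if PySem.Chars.isalpha c || PySem.Chars.isdigit c || ['-', '_', '.'].contains c
      then acc ++ [c] else acc) []
  -- step 3
  let answer := pvCollapseA answer
  -- step 4 (answer[0] raises IndexError on the empty string: Pre_ excludes that)
  let answer :=
    if PySem.List.pyGetD answer 0 ' ' = '.' then
      if answer.length > 1 then PySem.List.slice answer (some 1) none else ['.']
    else answer
  let answer :=
    if PySem.List.pyGetD answer (-1) ' ' = '.' then PySem.List.slice answer none (some (-1))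
    else answer
  -- step 5
  let answer := if answer = [] then ['a'] else answer
  -- step 6
  let answer :=
    if answer.length ≥ 16 then
      let a := PySem.List.slice answer none (some 15)
      if PySem.List.pyGetD a (-1) ' ' = '.' then PySem.List.slice a none (some (-1)) else a
    else answer
  -- step 7
  String.ofList (pvPadA answer)

-- ===== PORT B =====
def solution_alt (new_id : String) : String :=
  -- one pass: keep valid chars, skipping a '.' that would follow a '.'
  let out : List Char :=
    (PySem.Chars.lower new_id.toList).foldl (fun acc c =>
      if (PySem.Chars.isalnum c || ['-', '_', '.'].contains c)
          && !(c == '.' && acc.getLast? == some '.') then acc ++ [c] else acc) []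
  let s := PySem.Chars.stripChars out ['.']
  let s := if s.isEmpty then ['a'] else s
  let s :=
    if s.length ≥ 16 then
      -- s[:15].rstrip('.'), ported by hand (exact: drop the trailing '.' run)
      ((PySem.List.slice s none (some 15)).reverse.dropWhile (· == '.')).reverse
    else s
  String.ofList
    (if s.length ≥ 3 then s
     else s ++ List.replicate (3 - s.length) (PySem.List.pyGetD s (-1) ' '))

-- ===== PRECONDITION & SPEC =====
-- Pre_ excludes exactly the inputs with no valid character (letter, digit, '-', '_', '.')
-- after lowercasing: there A's `answer[0]` raises IndexError.
def Pre_solution (new_id : String) : Prop :=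
  (new_id.toList.map PySem.Chars.lowerChar).any
    (fun c => PySem.Chars.isalpha c || PySem.Chars.isdigit c || ['-', '_', '.'].contains c) = true
instance (new_id : String) : Decidable (Pre_solution new_id) := by unfold Pre_solution; infer_instance

def pvWitness_solution : String := "...Abc!"

-- A raises IndexError on inputs with no valid character; B returns "aaa" there.
def Raises_solution (new_id : String) : Prop :=
  (new_id.toList.map PySem.Chars.lowerChar).all
    (fun c => !(PySem.Chars.isalpha c || PySem.Chars.isdigit c || ['-', '_', '.'].contains c)) = true
instance (new_id : String) : Decidable (Raises_solution new_id) := by unfold Raises_solution; infer_instance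
def pvRaiseWitness_solution : String := "=]!"
def pvRaiseWitnessOut_solution : String := "aaa"

def Spec_solution (new_id : String) (out : String) : Prop := out = solution_alt new_id
instance (new_id : String) (out : String) : Decidable (Spec_solution new_id out) := by unfold Spec_solution; infer_instance

-- ===== CLAIM (what is proved, stated in full; the proofs are below) =====
def Claim_equal_solution : Prop := ∀ (new_id : String), Dom_solution new_id → Pre_solution new_id → Spec_solution new_id (solution new_id)
def Claim_raises_solution : Prop := (∀ (new_id : String), Dom_solution new_id → Raises_solution new_id → ¬ Pre_solution new_id) ∧ (Dom_solution (pvRaiseWitness_solution) ∧ Raises_solution (pvRaiseWitness_solution) ∧ solution_alt (pvRaiseWitness_solution) = pvRaiseWitnessOut_solution)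

-- ===== LEMMAS AND PROOFS =====

def pvValid (c : Char) : Bool :=
  PySem.Chars.isalpha c || PySem.Chars.isdigit c || ['-', '_', '.'].contains c

def pvDedF (p : Option Char) : List Char → List Char
  | [] => []
  | c :: t =>
    if (PySem.Chars.isalnum c || ['-', '_', '.'].contains c)
        && !(c == '.' && p == some '.') then c :: pvDedF (some c) t else pvDedF p t

def pvDed (p : Option Char) : List Char → List Char
  | [] => []
  | c :: t => if c = '.' ∧ p = some '.' then pvDed p t else c :: pvDed (some c) t

lemma pvDed_pvRep (l : List Char) : ∀ p, pvDed p (pvRep l) = pvDed p l := by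
  induction l using pvRep.induct with
  | case1 => simp [pvRep]
  | case2 c t hc ih =>
    intro p
    obtain ⟨hc1, hc2⟩ := hc
    subst hc1
    cases t with
    | nil => simp at hc2
    | cons d t' =>
      simp at hc2; subst hc2
      rw [pvRep, if_pos (by simp), List.tail_cons]
      by_cases hp : p = some '.'
      · simp [pvDed, hp]
        simpa using ih _
      · simp [pvDed, hp]
        simpa using ih _
  | case3 c t hc ih =>
    intro p
    rw [pvRep, if_neg hc]
    by_cases hp : c = '.' ∧ p = some '.'
    · simp [pvDed, hp]
      simpa using ih _
    · simp [pvDed, hp]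
      simpa using ih _

lemma pvDed_eq_self (l : List Char) :
    ∀ p, ¬ (['.', '.'] : List Char) <:+: l → (p ≠ some '.' ∨ l.head? ≠ some '.') →
      pvDed p l = l := by
  induction l with
  | nil => intro p _ _; rfl
  | cons c t ih =>
    intro p hdd hh
    have hnc : ¬ (c = '.' ∧ p = some '.') := by
      rintro ⟨h1, h2⟩
      rcases hh with h | h
      · exact h h2
      · exact h (by simp [h1])
    rw [pvDed]; simp only [if_neg hnc]
    have hdt : ¬ (['.', '.'] : List Char) <:+: t := fun h => hdd (h.trans (List.suffix_cons c t).isInfix)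
    congr 1
    apply ih (some c) hdt
    by_cases hcdot : c = '.'
    · right
      intro hth
      apply hdd
      apply List.IsPrefix.isInfix
      cases t with
      | nil => simp at hth
      | cons d t' =>
        simp at hth
        exact ⟨t', by simp [hcdot, hth]⟩
    · left; simp [hcdot]

lemma pvCollapseA_eq (l : List Char) : pvCollapseA l = pvDed none l := by
  induction l using pvCollapseA.induct with
  | case1 ans hin ih =>
    rw [pvCollapseA]
    simp only [if_pos hin]
    rw [ih, pvReplace_dd_eq, pvDed_pvRep]
  | case2 ans hin =>
    rw [pvCollapseA]
    simp only [if_neg hin]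
    have : ¬ (['.', '.'] : List Char) <:+: ans := by
      rw [← PySem.Chars.isIn_eq_false_iff]
      simpa using hin
    exact (pvDed_eq_self ans none this (by simp)).symm

lemma pvDed_head (l : List Char) : ∀ p, p = some '.' → (pvDed p l).head? ≠ some '.' := by
  induction l with
  | nil => intro p _; simp [pvDed]
  | cons c t ih =>
    intro p hp
    by_cases hc : c = '.' ∧ p = some '.'
    · rw [pvDed]; simp only [if_pos hc]; exact ih p hp
    · rw [pvDed]; simp only [if_neg hc]
      have : c ≠ '.' := fun h => hc ⟨h, hp⟩
      simp [this]

lemma pvDed_noDD (l : List Char) : ∀ p, ¬ (['.', '.'] : List Char) <:+: pvDed p l := by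
  induction l with
  | nil => intro p; simp [pvDed]
  | cons c t ih =>
    intro p
    by_cases hc : c = '.' ∧ p = some '.'
    · rw [pvDed]; simp only [if_pos hc]; simpa using ih _
    · rw [pvDed]; simp only [if_neg hc]
      intro hdd
      rcases List.infix_cons_iff.mp hdd with hpre | hinf
      · rcases hpre with ⟨r, hr⟩
        injection hr with h1 h2
        have : (pvDed (some c) t).head? = some '.' := by
          cases h : pvDed (some c) t with
          | nil => rw [h] at h2; simp at h2
          | cons d t' =>
            rw [h] at h2
            injection h2 with h3 _
            simp [h3.symm]
        exact pvDed_head t (some c) (by rw [← h1]) this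
      · exact ih (some c) hinf

lemma pvDed_none_ne_nil (l : List Char) (h : l ≠ []) : pvDed none l ≠ [] := by
  cases l with
  | nil => exact absurd rfl h
  | cons c t =>
    rw [pvDed]
    simp only [if_neg (by simp : ¬ (c = '.' ∧ (none : Option Char) = some '.'))]
    simp

lemma pvDropDot (s : List Char) (hdd : ¬ (['.', '.'] : List Char) <:+: s) :
    List.dropWhile (fun c => c == '.') s = if s.head? = some '.' then s.tail else s := by
  cases s with
  | nil => simp
  | cons c t =>
    by_cases hc : c = '.'
    · subst hc
      simp only [List.head?_cons, List.tail_cons]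
      rw [List.dropWhile_cons_of_pos (by simp)]
      cases t with
      | nil => simp
      | cons d t' =>
        have hd : d ≠ '.' := by
          intro h; subst h
          exact hdd (List.IsPrefix.isInfix ⟨t', rfl⟩)
        rw [List.dropWhile_cons_of_neg (by simp [hd])]
        simp
    · rw [List.dropWhile_cons_of_neg (by simp [hc])]
      simp [hc]

lemma pvContains_dot : (fun c => (['.'] : List Char).contains c) = (fun c => c == '.') := by
  funext c
  by_cases h : c = '.' <;> simp [h]

lemma pvRevDD (u : List Char) (hdd : ¬ (['.', '.'] : List Char) <:+: u) :
    ¬ (['.', '.'] : List Char) <:+: u.reverse := by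
  intro h
  apply hdd
  have h2 := h.reverse
  simpa using h2

lemma pvRstrip_eq (u : List Char) (hne : u ≠ []) (hdd : ¬ (['.', '.'] : List Char) <:+: u) :
    (if PySem.List.pyGetD u (-1) ' ' = '.' then PySem.List.slice u none (some (-1)) else u) =
      (u.reverse.dropWhile (fun c => c == '.')).reverse := by
  rw [pvDropDot _ (pvRevDD u hdd)]
  rw [List.head?_reverse]
  rw [PySem.List.pyGetD_neg_one u ' ' hne, PySem.List.slice_to_neg_one]
  by_cases hl : u.getLast? = some '.'
  · have : u.getLast hne = '.' := by
      rw [List.getLast?_eq_some_getLast hne] at hl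
      exact Option.some_inj.mp hl
    rw [if_pos this, if_pos hl, List.tail_reverse, List.reverse_reverse]
  · have : u.getLast hne ≠ '.' := by
      intro h
      exact hl (by rw [List.getLast?_eq_some_getLast hne, h])
    rw [if_neg this, if_neg hl, List.reverse_reverse]

lemma pvFoldA (l : List Char) :
    l.foldl (fun acc c =>
      if PySem.Chars.isalpha c || PySem.Chars.isdigit c || ['-', '_', '.'].contains c
      then acc ++ [c] else acc) [] = l.filter pvValid := by
  have h := PySem.List.foldl_append_if
    (fun c => PySem.Chars.isalpha c || PySem.Chars.isdigit c || ['-', '_', '.'].contains c)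
    id l []
  exact h.trans (by
    simp only [List.map_id, List.nil_append]
    rfl)

lemma pvFoldB_go (l : List Char) : ∀ acc : List Char,
    l.foldl (fun acc c =>
      if (PySem.Chars.isalnum c || ['-', '_', '.'].contains c)
          && !(c == '.' && acc.getLast? == some '.') then acc ++ [c] else acc) acc
      = acc ++ pvDedF acc.getLast? l := by
  induction l with
  | nil => intro acc; simp [pvDedF]
  | cons c t ih =>
    intro acc
    rw [List.foldl_cons, pvDedF]
    by_cases hc : ((PySem.Chars.isalnum c || ['-', '_', '.'].contains c)
        && !(c == '.' && acc.getLast? == some '.')) = true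
    · rw [if_pos hc, if_pos hc, ih, List.getLast?_concat]
      simp
    · rw [if_neg hc, if_neg hc, ih]

lemma pvDedF_eq (l : List Char) : ∀ p, pvDedF p l = pvDed p (l.filter pvValid) := by
  induction l with
  | nil => intro p; simp [pvDedF, pvDed, List.filter_nil]
  | cons c t ih =>
    intro p
    rw [pvDedF]
    by_cases hv : pvValid c = true
    · have hv' : (PySem.Chars.isalnum c || ['-', '_', '.'].contains c) = true := by
        simpa [pvValid, PySem.Chars.isalnum, Bool.or_assoc] using hv
      rw [List.filter_cons_of_pos hv, pvDed]
      by_cases hdot : c = '.' ∧ p = some '.'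
      · rw [if_pos hdot]
        rw [if_neg (by simp [hdot.1, hdot.2])]
        exact ih p
      · rw [if_neg hdot]
        rw [if_pos (by
          rw [hv', Bool.true_and, Bool.not_eq_true', Bool.and_eq_false_iff]
          simp only [beq_eq_false_iff_ne, ne_eq]
          by_cases h1 : c = '.'
          · exact Or.inr (fun h2 => hdot ⟨h1, h2⟩)
          · exact Or.inl h1)]
        rw [ih (some c)]
    · have hv' : (PySem.Chars.isalnum c || ['-', '_', '.'].contains c) = false := by
        simpa [pvValid, PySem.Chars.isalnum, Bool.or_assoc] using hv
      rw [List.filter_cons_of_neg (by simp [hv]), if_neg (by rw [hv']; simp)]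
      exact ih p

lemma pvStrip_eq (s : List Char) (hne : s ≠ []) (hdd : ¬ (['.', '.'] : List Char) <:+: s) :
    (if PySem.List.pyGetD
          (if PySem.List.pyGetD s 0 ' ' = '.' then
            (if s.length > 1 then PySem.List.slice s (some 1) none else ['.']) else s) (-1) ' ' = '.'
      then PySem.List.slice
          (if PySem.List.pyGetD s 0 ' ' = '.' then
            (if s.length > 1 then PySem.List.slice s (some 1) none else ['.']) else s) none (some (-1))
      else (if PySem.List.pyGetD s 0 ' ' = '.' then
            (if s.length > 1 then PySem.List.slice s (some 1) none else ['.']) else s))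
      = PySem.Chars.stripChars s ['.'] := by
  rw [PySem.Chars.stripChars]
  simp only [pvContains_dot]
  cases s with
  | nil => exact absurd rfl hne
  | cons c t =>
    rw [PySem.List.pyGetD_zero_cons]
    rw [pvDropDot _ hdd]
    by_cases hc : c = '.'
    · subst hc
      rw [if_pos rfl, if_pos (show (('.' :: t).head? = some '.') from rfl), List.tail_cons]
      cases t with
      | nil => decide
      | cons d t' =>
        rw [if_pos (show ('.' :: d :: t').length > 1 by simp)]
        rw [PySem.List.slice_from_one, List.tail_cons]
        exact pvRstrip_eq (d :: t') (by simp)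
          (fun h => hdd (h.trans (List.suffix_cons '.' (d :: t')).isInfix))
    · rw [if_neg hc, if_neg (show ¬((c :: t).head? = some '.') by simp [hc])]
      exact pvRstrip_eq (c :: t) (by simp) hdd

lemma pvPad_eq (u : List Char) (hne : u ≠ []) :
    pvPadA u = if u.length ≥ 3 then u
      else u ++ List.replicate (3 - u.length) (PySem.List.pyGetD u (-1) ' ') := by
  have ha : ∀ a : Char, PySem.List.pyGetD [a] (-1) ' ' = a := fun a => by
    rw [PySem.List.pyGetD_neg_one [a] ' ' (by simp)]; rfl
  have hb : ∀ a b : Char, PySem.List.pyGetD [a, b] (-1) ' ' = b := fun a b => by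
    rw [PySem.List.pyGetD_neg_one [a, b] ' ' (by simp)]; rfl
  match u with
  | [a] =>
    rw [pvPadA, if_pos (by simp), ha]
    rw [pvPadA, if_pos (by simp), PySem.List.pyGetD_neg_one_append_singleton]
    rw [pvPadA, if_neg (by simp)]
    rw [if_neg (by simp)]
    simp [List.replicate]
  | [a, b] =>
    rw [pvPadA, if_pos (by simp), hb]
    rw [pvPadA, if_neg (by simp)]
    rw [if_neg (by simp)]
    simp
  | a :: b :: c :: r =>
    rw [pvPadA, if_neg (by simp)]
    rw [if_pos (by simp)]

lemma pvStrip_infix (s : List Char) :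
    PySem.Chars.stripChars s ['.'] <:+: s := by
  rw [PySem.Chars.stripChars]
  have h1 : List.dropWhile (fun c => (['.'] : List Char).contains c) s <:+ s :=
    List.dropWhile_suffix _
  have h2 : List.dropWhile (fun c => (['.'] : List Char).contains c)
      (List.dropWhile (fun c => (['.'] : List Char).contains c) s).reverse <:+
      (List.dropWhile (fun c => (['.'] : List Char).contains c) s).reverse :=
    List.dropWhile_suffix _
  have h3 := h2.reverse
  rw [List.reverse_reverse] at h3
  exact h3.isInfix.trans h1.isInfix

theorem solution_spec : Claim_equal_solution := by
  intro new_id _ hpre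
  unfold Spec_solution solution solution_alt
  simp only [pvFoldA, pvFoldB_go, List.getLast?_nil, pvDedF_eq, pvCollapseA_eq,
    List.nil_append, List.isEmpty_iff]
  have hfne : (PySem.Chars.lower new_id.toList).filter pvValid ≠ [] := by
    unfold Pre_solution at hpre
    rw [List.any_eq_true] at hpre
    obtain ⟨c, hc, hv⟩ := hpre
    intro h
    rw [List.filter_eq_nil_iff] at h
    exact h c (by simpa [PySem.Chars.lower] using hc) (by simpa [pvValid] using hv)
  have hs0ne : pvDed none ((PySem.Chars.lower new_id.toList).filter pvValid) ≠ [] :=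
    pvDed_none_ne_nil _ hfne
  have hs0dd := pvDed_noDD ((PySem.Chars.lower new_id.toList).filter pvValid) none
  rw [pvStrip_eq _ hs0ne hs0dd]
  set w := PySem.Chars.stripChars
    (pvDed none ((PySem.Chars.lower new_id.toList).filter pvValid)) ['.'] with hw
  set s5 := if w = [] then ['a'] else w with hs5
  have hs5ne : s5 ≠ [] := by
    rw [hs5]; split
    · simp
    · assumption
  have hs5dd : ¬ (['.', '.'] : List Char) <:+: s5 := by
    rw [hs5]; split
    · decide
    · exact fun h => hs0dd (h.trans (pvStrip_infix _))
  by_cases h16 : s5.length ≥ 16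
  · rw [if_pos h16, if_pos h16]
    rw [show (15 : Int) = ((15 : Nat) : Int) from rfl, PySem.List.slice_to_natCast]
    have hane : s5.take 15 ≠ [] := by
      intro h
      have h0 : (s5.take 15).length = 0 := by rw [h]; rfl
      rw [List.length_take] at h0
      omega
    have hadd : ¬ (['.', '.'] : List Char) <:+: s5.take 15 :=
      fun h => hs5dd (h.trans (List.take_prefix 15 s5).isInfix)
    have hXne : (if PySem.List.pyGetD (s5.take 15) (-1) ' ' = '.' then
        PySem.List.slice (s5.take 15) none (some (-1)) else s5.take 15) ≠ [] := by
      have hlen : (s5.take 15).length = 15 := by simp; omega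
      split
      · rw [PySem.List.slice_to_neg_one]
        intro h
        have := congrArg List.length h
        simp [hlen] at this
      · exact hane
    rw [pvRstrip_eq _ hane hadd] at hXne
    rw [pvRstrip_eq _ hane hadd]
    rw [pvPad_eq _ hXne]
  · rw [if_neg h16, if_neg h16]
    rw [pvPad_eq s5 hs5ne]

theorem solution_raises : Claim_raises_solution := by
  unfold Claim_raises_solution
  constructor
  · intro new_id _ hr hp
    unfold Pre_solution at hp
    unfold Raises_solution at hr
    rw [List.any_eq_true] at hp
    obtain ⟨c, hc, hv⟩ := hp
    rw [List.all_eq_true] at hr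
    have := hr c hc
    simp at this
    simp [this.1.1, this.1.2, this.2.1, this.2.2.1, this.2.2.2] at hv
  · refine ⟨by decide, by decide, by decide⟩

-- self-check (kept on purpose): re-reads off from solution_raises that the stated witness really lies in Raises_
theorem pvRaisesWitness_ok : Raises_solution pvRaiseWitness_solution := solution_raises.2.2.1
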